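-- pv_equiv track=rewrite | github.com/Mawule1405/algo_robinson | Metier_TP_algo_unificateur.py | cap_terme
-- ===== SOURCE A (Python) =====
-- def fonction(elt):
-- 	return elt=="f" or elt=="g" or elt=="h"
--
-- def cap_terme(elt):
-- 	taille = len(elt)                                       #recupere le premier terme un terme
-- 	if taille>1:
-- 		i=1
-- 		post=[]
-- 		for i in range(taille):
-- 			if fonction(elt[i]):
-- 				post.append(i)
--
-- 			if elt[i]==')':
-- 				post.append(i)
-- 				break
-- 		try:
-- 			return elt[post[0]:post[1]+1]
-- 		except:
-- 			return "rien"
-- ===== SOURCE B (Python) =====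
-- def first_close(s):
--     for i, c in enumerate(s):
--         if c == ')':
--             return i
--     return None
--
-- def fgh_indices(s):
--     return [i for i, c in enumerate(s) if c in ('f', 'g', 'h')]
--
-- def cap_terme(elt):
--     taille = len(elt)
--     if taille > 1:
--         r = first_close(elt)
--         pre = elt if r is None else elt[:r]
--         cands = fgh_indices(pre)
--         if r is not None:
--             cands = cands + [r]
--         if len(cands) >= 2:
--             return elt[cands[0]:cands[1] + 1]
--         return "rien"
-- ===== Notes on version B (the rewrite author's own statement) =====
-- stated objective: simpler
-- what changed: A interleaves candidate collection and the ')' stop inside one indexed loop with a try/except on list indexing; B first locates the first ')', then builds the candidate index list from the prefix by a comprehension and decides by its length, with no exception handling.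
-- outside the precondition, e.g. on cap_terme('f'): A returns None, B returns None; on cap_terme(')'): A returns None, B returns None
import Mathlib
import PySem

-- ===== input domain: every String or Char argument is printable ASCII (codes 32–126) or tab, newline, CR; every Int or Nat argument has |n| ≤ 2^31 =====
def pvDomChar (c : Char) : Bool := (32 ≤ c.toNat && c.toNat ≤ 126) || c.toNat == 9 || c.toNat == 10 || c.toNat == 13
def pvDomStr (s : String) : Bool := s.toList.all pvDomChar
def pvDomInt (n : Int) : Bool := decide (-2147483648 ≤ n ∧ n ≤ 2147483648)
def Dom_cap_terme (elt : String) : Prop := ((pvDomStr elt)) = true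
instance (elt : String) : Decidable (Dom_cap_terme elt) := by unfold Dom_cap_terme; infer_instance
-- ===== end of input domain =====

-- B replaces A's single interleaved loop with try/except by: find the first ')', list the f/g/h
-- indices of the prefix, decide by that list's length (same return values; no speed claim).

-- ===== PORT A =====
-- A's helper 'fonction': elt == "f" or elt == "g" or elt == "h" (applied to one character)
def pvFonction (c : Char) : Bool := c = 'f' || c = 'g' || c = 'h'

-- A's 'for i in range(taille): …' with accumulator 'post'; 'break' ends the recursion
def pvAloop : List Char → Nat → List Int → List Int
  | [], _, post => post
  | c :: t, i, post =>
    let post1 := if pvFonction c then post ++ [(i : Int)] else post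
    if c = ')' then post1 ++ [(i : Int)] else pvAloop t (i + 1) post1

def cap_terme (elt : String) : String :=
  let cs := elt.toList
  let taille := cs.length
  if taille > 1 then
    let post := pvAloop cs 0 []
    match post with
    | p0 :: p1 :: _ => String.ofList (PySem.List.slice cs (some p0) (some (p1 + 1)))
    | _ => "rien"            -- the try/except: fewer than two entries in post raises IndexError
  else "rien"                -- Python returns None here (not a String); excluded by Pre_

-- ===== PORT B =====
-- Source B helper first_close: index of the first ')', None if absent
def pvFirstClose : List Char → Nat → Option Nat
  | [], _ => none
  | c :: t, i => if c = ')' then some i else pvFirstClose t (i + 1)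

-- Source B helper fgh_indices: [i for i, c in enumerate(s) if c in ('f', 'g', 'h')]
def pvFghIdx : List Char → Nat → List Int
  | [], _ => []
  | c :: t, i => if c = 'f' || c = 'g' || c = 'h'
                 then (i : Int) :: pvFghIdx t (i + 1) else pvFghIdx t (i + 1)

def cap_terme_alt (elt : String) : String :=
  let cs := elt.toList
  let taille := cs.length
  if taille > 1 then
    let r? := pvFirstClose cs 0
    let pre := match r? with
      | none => cs
      | some r => PySem.List.slice cs none (some (r : Int))   -- elt[:r]
    let cands0 := pvFghIdx pre 0
    let cands := match r? with
      | none => cands0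
      | some r => cands0 ++ [(r : Int)]
    if 2 ≤ cands.length then   -- if len(cands) >= 2
      String.ofList (PySem.List.slice cs (some cands[0]!) (some (cands[1]! + 1)))
    else "rien"
  else "rien"                -- Python returns None here (not a String); excluded by Pre_

-- ===== PRECONDITION & SPEC =====
-- Pre_ excludes strings of length ≤ 1, on which A falls through and returns None, not a string.
def Pre_cap_terme (elt : String) : Prop := 1 < elt.toList.length
instance (elt : String) : Decidable (Pre_cap_terme elt) := by unfold Pre_cap_terme; infer_instance
def pvWitness_cap_terme : String := "fg)"

def Spec_cap_terme (elt : String) (out : String) : Prop := out = cap_terme_alt elt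
instance (elt : String) (out : String) : Decidable (Spec_cap_terme elt out) := by unfold Spec_cap_terme; infer_instance

-- ===== CLAIM (what is proved, stated in full; the proofs are below) =====
def Claim_equal_cap_terme : Prop := ∀ (elt : String), Dom_cap_terme elt → Pre_cap_terme elt → Spec_cap_terme elt (cap_terme elt)

-- ===== LEMMAS AND PROOFS =====

-- A's loop only ever appends: the accumulator is a prefix of the result
lemma pvAloop_acc (cs : List Char) (i : Nat) (post : List Int) :
    pvAloop cs i post = post ++ pvAloop cs i [] := by
  induction cs generalizing i post with
  | nil => simp [pvAloop]
  | cons c t ih =>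
    simp only [pvAloop]
    by_cases hc : c = ')'
    · simp [hc, pvFonction]
    · simp only [hc, if_false]
      by_cases hf : pvFonction c
      · simp only [hf, if_true, List.nil_append]
        rw [ih (i+1) (post ++ [(i:Int)]), ih (i+1) [(i:Int)]]
        simp
      · simp only [hf, if_false]
        exact ih (i+1) post

lemma pvFirstClose_ge (cs : List Char) (i r : Nat) (h : pvFirstClose cs i = some r) : i ≤ r := by
  induction cs generalizing i with
  | nil => simp [pvFirstClose] at h
  | cons c t ih =>
    simp only [pvFirstClose] at h
    split at h
    · cases h; omega
    · have := ih (i + 1) h; omega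

-- characterisation of A's loop in B's terms: the f/g/h indices of the prefix before
-- the first ')', followed by the index of that ')' when it exists
lemma pvAloop_eq (cs : List Char) (i : Nat) :
    pvAloop cs i [] =
      (match pvFirstClose cs i with
       | some r => pvFghIdx (cs.take (r - i)) i ++ [(r : Int)]
       | none => pvFghIdx cs i) := by
  induction cs generalizing i with
  | nil => simp [pvAloop, pvFirstClose, pvFghIdx]
  | cons c t ih =>
    by_cases hc : c = ')'
    · simp [pvAloop, pvFirstClose, hc, pvFonction, pvFghIdx]
    · have hstep : pvAloop (c :: t) i [] =
          (if pvFonction c then [(i:Int)] else []) ++ pvAloop t (i+1) [] := by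
        simp only [pvAloop, hc, if_false]
        by_cases hf : pvFonction c
        · simp only [hf, if_true, List.nil_append]
          exact pvAloop_acc t (i+1) [(i:Int)]
        · simp [hf]
      rw [hstep, ih (i+1)]
      have hfc : pvFirstClose (c :: t) i = pvFirstClose t (i+1) := by
        simp [pvFirstClose, hc]
      rw [hfc]
      cases hr : pvFirstClose t (i + 1) with
      | none =>
        simp only [pvFghIdx, pvFonction]
        split <;> simp
      | some r =>
        have hge := pvFirstClose_ge t (i + 1) r hr
        have htake : (c :: t).take (r - i) = c :: t.take (r - (i + 1)) := by
          have h1 : r - i = (r - (i + 1)) + 1 := by omega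
          rw [h1]; rfl
        simp only [htake, pvFghIdx, pvFonction]
        split <;> simp

-- A's match on the first two candidates equals B's length test with indexing
lemma match_eq_if (cs : List Char) (l : List Int) :
    (match l with
     | p0 :: p1 :: _ => String.ofList (PySem.List.slice cs (some p0) (some (p1 + 1)))
     | _ => "rien")
    = (if 2 ≤ l.length then
         String.ofList (PySem.List.slice cs (some l[0]!) (some (l[1]! + 1)))
       else "rien") := by
  match l with
  | [] => simp
  | [a] => simp
  | a :: b :: t => simp

-- ===== VERDICT (by name: the statement is the Claim_ definition above) =====
theorem cap_terme_spec : Claim_equal_cap_terme := by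
  intro elt _ hpre
  unfold Spec_cap_terme
  have hpre' : 1 < elt.toList.length := hpre
  simp only [cap_terme, cap_terme_alt, gt_iff_lt, hpre', if_true]
  rw [pvAloop_eq elt.toList 0]
  rw [match_eq_if]
  cases hr : pvFirstClose elt.toList 0 with
  | none => simp
  | some r =>
    have hs : PySem.List.slice elt.toList none (some (r : Int)) = elt.toList.take r := by
      rw [PySem.List.slice_to]
      · simp
      · positivity
    simp [hs]
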